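-- pv_equiv track=rewrite | github.com/deepakkumarIIITD/BIOLOGY-CODING-ASSIGNMENT---FOB | answer5.py | proper_codon_giver
-- ===== SOURCE A (Python) =====
-- def proper_codon_giver(requiered_array_list , list_of_methyl_starters):
-- 	l = []
-- 	for i in range(len(list_of_methyl_starters)):
-- 		start = list_of_methyl_starters[i]
-- 		working_list = requiered_array_list[start:len(requiered_array_list)]
-- 		k = []
-- 		for i in range(len(working_list)):
-- 			if(working_list[i] != "@@@"):
-- 				k.append(working_list[i])
-- 			else:
-- 				break
-- 		l.append(k)
-- 	return l
-- ===== SOURCE B (Python) =====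
-- def proper_codon_giver(requiered_array_list, list_of_methyl_starters):
--     n = len(requiered_array_list)
--     # one right-to-left pass: nxt[i] = index of the first "@@@" at or after i (n if none)
--     nxt = [n] * (n + 1)
--     for i in range(n - 1, -1, -1):
--         nxt[i] = i if requiered_array_list[i] == "@@@" else nxt[i + 1]
--     out = []
--     for s in list_of_methyl_starters:
--         e = max(0, n + s) if s < 0 else min(s, n)
--         out.append(requiered_array_list[e:nxt[e]])
--     return out
-- ===== Notes on version B (the rewrite author's own statement) =====
-- stated objective: alternative
-- what changed: Replaces the per-start slice-then-element-by-element scan with one right-to-left pass precomputing the index of the next '@@@' for every position, so each start is answered by a single direct slice.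
import Mathlib
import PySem

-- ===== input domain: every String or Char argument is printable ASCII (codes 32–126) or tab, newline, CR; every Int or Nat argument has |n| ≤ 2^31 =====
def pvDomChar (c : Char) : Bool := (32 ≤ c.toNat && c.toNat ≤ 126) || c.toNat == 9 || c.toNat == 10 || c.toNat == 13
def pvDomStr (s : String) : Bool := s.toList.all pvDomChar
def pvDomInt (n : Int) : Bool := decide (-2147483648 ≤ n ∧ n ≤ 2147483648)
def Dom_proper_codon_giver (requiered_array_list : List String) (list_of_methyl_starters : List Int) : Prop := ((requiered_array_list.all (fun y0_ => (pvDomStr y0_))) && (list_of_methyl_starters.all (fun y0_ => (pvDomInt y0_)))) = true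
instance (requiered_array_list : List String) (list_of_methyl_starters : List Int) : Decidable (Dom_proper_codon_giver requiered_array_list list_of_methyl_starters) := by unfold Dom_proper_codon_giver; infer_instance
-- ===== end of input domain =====

-- B replaces A's per-start element-by-element scan by one right-to-left pass that
-- precomputes the index of the next "@@@" for every position, then slices directly (alternative algorithm; output construction still dominates).

-- ===== PORT A =====
-- A's inner loop: walk the working list, append elements until "@@@" (break).
def pcgScan : List String → List String
  | [] => []
  | x :: rest => if x ≠ "@@@" then x :: pcgScan rest else []

def proper_codon_giver (requiered_array_list : List String) (list_of_methyl_starters : List Int) : List (List String) :=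
  list_of_methyl_starters.map (fun start =>
    pcgScan (PySem.List.slice requiered_array_list (some start) (some (requiered_array_list.length : Int))))

-- ===== PORT B =====
-- right-to-left table: (pcgNext xs i) lists nxt[i], nxt[i+1], …, nxt[i+len xs]
def pcgNext : List String → Nat → List Nat
  | [], i => [i]
  | x :: rest, i =>
      let t := pcgNext rest (i + 1)
      (if x = "@@@" then i else t.headD (i + 1)) :: t

def proper_codon_giver_alt (requiered_array_list : List String) (list_of_methyl_starters : List Int) : List (List String) :=
  let n := requiered_array_list.length
  let nxt := pcgNext requiered_array_list 0
  list_of_methyl_starters.map (fun s =>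
    let e : Nat := if s < 0 then (max 0 ((n : Int) + s)).toNat else min s.toNat n
    (requiered_array_list.drop e).take (nxt.getD e n - e))

-- ===== PRECONDITION & SPEC =====
def Spec_proper_codon_giver (requiered_array_list : List String) (list_of_methyl_starters : List Int) (out : List (List String)) : Prop := out = proper_codon_giver_alt requiered_array_list list_of_methyl_starters
instance (requiered_array_list : List String) (list_of_methyl_starters : List Int) (out : List (List String)) : Decidable (Spec_proper_codon_giver requiered_array_list list_of_methyl_starters out) := by unfold Spec_proper_codon_giver; infer_instance

-- ===== CLAIM (what is proved, stated in full; the proofs are below) =====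
def Claim_equal_proper_codon_giver : Prop := ∀ (requiered_array_list : List String) (list_of_methyl_starters : List Int), Dom_proper_codon_giver requiered_array_list list_of_methyl_starters → Spec_proper_codon_giver requiered_array_list list_of_methyl_starters (proper_codon_giver requiered_array_list list_of_methyl_starters)

-- ===== LEMMAS AND PROOFS =====

theorem pcgScan_eq_takeWhile (l : List String) : pcgScan l = l.takeWhile (· ≠ "@@@") := by
  induction l with
  | nil => rfl
  | cons x rest ih =>
      by_cases h : x = "@@@" <;> simp [pcgScan, List.takeWhile, h, ih]

theorem take_takeWhile_length {α : Type} (p : α → Bool) (l : List α) :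
    l.take (l.takeWhile p).length = l.takeWhile p := by
  induction l with
  | nil => rfl
  | cons x rest ih =>
      by_cases h : p x <;> simp [List.takeWhile, h, ih]

theorem pcgNext_getD (xs : List String) (i j d : Nat) (hj : j ≤ xs.length) :
    (pcgNext xs i).getD j d = (i + j) + ((xs.drop j).takeWhile (· ≠ "@@@")).length := by
  induction xs generalizing i j d with
  | nil =>
      have hj0 : j = 0 := Nat.le_zero.mp hj
      subst hj0
      simp [pcgNext]
  | cons x rest ih =>
      cases j with
      | zero =>
          by_cases h : x = "@@@"
          · simp [pcgNext, h]
          · have hh : (pcgNext rest (i + 1)).headD (i + 1)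
                = (pcgNext rest (i + 1)).getD 0 (i + 1) := by
              cases pcgNext rest (i + 1) <;> rfl
            have hih := ih (i + 1) 0 (i + 1) (Nat.zero_le _)
            simp only [List.drop_zero] at hih
            have ht : (List.takeWhile (fun y => decide (y ≠ "@@@")) (x :: rest)).length
                = (List.takeWhile (fun y => decide (y ≠ "@@@")) rest).length + 1 := by
              simp [h]
            simp only [pcgNext, List.getD_cons_zero, if_neg h, hh, hih, List.drop_zero, ht]
            omega
      | succ j' =>
          have hih := ih (i + 1) j' d (by simpa using hj)
          simp only [pcgNext, List.getD_cons_succ, hih, List.drop_succ_cons]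
          omega

theorem clampIdx_eq_e (n : Nat) (s : Int) :
    PySem.List.clampIdx n s = if s < 0 then (max 0 ((n : Int) + s)).toNat else min s.toNat n := by
  simp [PySem.List.clampIdx]
  split_ifs <;> omega

theorem slice_full (xs : List String) (a : Int) :
    PySem.List.slice xs (some a) (some (xs.length : Int)) = xs.drop (PySem.List.clampIdx xs.length a) := by
  simp [PySem.List.slice]

-- ===== VERDICT (by name: the statement is the Claim_ definition above) =====
theorem proper_codon_giver_spec : Claim_equal_proper_codon_giver := by
  intro xs starts _
  unfold Spec_proper_codon_giver proper_codon_giver proper_codon_giver_alt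
  apply List.map_congr_left
  intro s _
  show pcgScan (PySem.List.slice xs (some s) (some (xs.length : Int)))
      = List.take ((pcgNext xs 0).getD
            (if s < 0 then (max 0 ((xs.length : Int) + s)).toNat else min s.toNat xs.length)
            xs.length
          - (if s < 0 then (max 0 ((xs.length : Int) + s)).toNat else min s.toNat xs.length))
          (List.drop (if s < 0 then (max 0 ((xs.length : Int) + s)).toNat else min s.toNat xs.length) xs)
  have hen : (if s < 0 then (max 0 ((xs.length : Int) + s)).toNat else min s.toNat xs.length) ≤ xs.length := by
    split_ifs <;> omega
  rw [slice_full, clampIdx_eq_e, pcgScan_eq_takeWhile,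
    pcgNext_getD xs 0 _ xs.length hen]
  simp only [Nat.zero_add, Nat.add_sub_cancel_left]
  exact (take_takeWhile_length _ _).symm
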